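-- pv_equiv track=rewrite | github.com/rdemaria/pyoptics | pyoptics/foot.py | getmn
-- ===== SOURCE A (Python) =====
-- def getmn(o, s="b"):
--     out = []
--     for m in range(0, o + 1):
--         n = o - m
--         if s == "b" and n % 2 == 0:
--             out.append((m, n))
--             if n > 0:
--                 out.append((m, -n))
--         elif s == "a" and n % 2 == 1:
--             out.append((m, n))
--             if n > 0:
--                 out.append((m, -n))
--     return out
-- ===== SOURCE B (Python) =====
-- def getmn(o, s="b"):
--     # pick the residue class of m directly and step by two (no in-loop parity test)
--     if s == "b":
--         start = o % 2
--     elif s == "a":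
--         start = 1 - o % 2
--     else:
--         return []
--     out = []
--     for m in range(start, o + 1, 2):
--         n = o - m
--         out.append((m, n))
--         if n > 0:
--             out.append((m, -n))
--     return out
-- ===== Notes on version B (the rewrite author's own statement) =====
-- stated objective: simpler
-- what changed: B picks the residue class of m from s and o's parity up front and iterates range(start, o+1, 2), so the loop visits only the emitted indices and carries no parity test or string comparison per iteration.
import Mathlib
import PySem

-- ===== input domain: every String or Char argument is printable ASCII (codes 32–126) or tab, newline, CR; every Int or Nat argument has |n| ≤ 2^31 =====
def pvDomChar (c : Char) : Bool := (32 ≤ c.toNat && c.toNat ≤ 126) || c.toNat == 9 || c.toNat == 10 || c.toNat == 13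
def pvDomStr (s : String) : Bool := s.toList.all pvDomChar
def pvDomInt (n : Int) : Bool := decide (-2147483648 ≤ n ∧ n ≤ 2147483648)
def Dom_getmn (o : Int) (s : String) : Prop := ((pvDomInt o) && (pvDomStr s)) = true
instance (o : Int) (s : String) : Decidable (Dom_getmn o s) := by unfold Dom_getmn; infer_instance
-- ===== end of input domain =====

-- B replaces A's per-iteration parity/string test by choosing the residue class of m up front
-- and stepping by two (objective: simpler loop; equal asymptotic cost).


-- ===== PORT A =====
def getmn (o : Int) (s : String) : List (Int × Int) :=
  (PySem.List.pyRange 0 (o + 1) 1).foldl (fun out m =>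
    let n := o - m
    if s == "b" && (PySem.Int.mod n 2 == 0) then
      let out := out ++ [(m, n)]
      if n > 0 then out ++ [(m, -n)] else out
    else if s == "a" && (PySem.Int.mod n 2 == 1) then
      let out := out ++ [(m, n)]
      if n > 0 then out ++ [(m, -n)] else out
    else out) []

-- ===== PORT B =====
-- the 'for m in range(start, o+1, 2)' loop of Source B
def getmnLoop (o start : Int) : List (Int × Int) :=
  (PySem.List.pyRange start (o + 1) 2).foldl (fun out m =>
    let n := o - m
    let out := out ++ [(m, n)]
    if n > 0 then out ++ [(m, -n)] else out) []

def getmn_alt (o : Int) (s : String) : List (Int × Int) :=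
  if s == "b" then getmnLoop o (PySem.Int.mod o 2)
  else if s == "a" then getmnLoop o (1 - PySem.Int.mod o 2)
  else []

-- ===== PRECONDITION & SPEC =====
def Spec_getmn (o : Int) (s : String) (out : List (Int × Int)) : Prop := out = getmn_alt o s
instance (o : Int) (s : String) (out : List (Int × Int)) : Decidable (Spec_getmn o s out) := by unfold Spec_getmn; infer_instance

-- ===== CLAIM (what is proved, stated in full; the proofs are below) =====
def Claim_equal_getmn : Prop := ∀ (o : Int) (s : String), Dom_getmn o s → Spec_getmn o s (getmn o s)

-- ===== LEMMAS AND PROOFS =====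

-- the pair block both loop bodies append for index m
def pvPairs (o m : Int) : List (Int × Int) :=
  [(m, o - m)] ++ (if o - m > 0 then [(m, -(o - m))] else [])

lemma pvRange2_nil (a b : Int) (h : b ≤ a) : PySem.List.pyRange a b 2 = [] := by
  rw [PySem.List.pyRange_of_pos a b (by norm_num)]
  simp [show ¬ a < b by omega]

lemma pvRange2_cons (a b : Int) (h : a < b) :
    PySem.List.pyRange a b 2 = a :: PySem.List.pyRange (a + 2) b 2 := by
  rw [PySem.List.pyRange_of_pos a b (by norm_num),
      PySem.List.pyRange_of_pos (a + 2) b (by norm_num)]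
  by_cases h2 : a + 2 < b
  · have hn : ((b - a + 2 - 1) / 2).toNat = ((b - (a + 2) + 2 - 1) / 2).toNat + 1 := by omega
    simp only [if_pos h, if_pos h2, hn, List.range_succ_eq_map, List.map_cons, List.map_map]
    congr 1
    · push_cast; ring
    · apply List.map_congr_left; intro k _
      simp only [Function.comp, Nat.succ_eq_add_one]; push_cast; ring
  · have hn : ((b - a + 2 - 1) / 2).toNat = 1 := by omega
    simp [if_pos h, if_neg h2, hn, List.range_succ]

-- the parity filter over a unit-step range IS the step-two range of the residue class
lemma pvFilter_parity (a b r : Int) (ha : a ≤ r) (hr : r < a + 2) :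
    (PySem.List.pyRange a b 1).filter (fun m => m % 2 == r % 2) = PySem.List.pyRange r b 2 := by
  by_cases hab : a < b
  · rw [PySem.List.pyRange_one_cons hab, List.filter_cons]
    by_cases hp : a % 2 = r % 2
    · have har : a = r := by omega
      subst har
      have : ((a % 2 == a % 2) : Bool) = true := by simp
      rw [this]
      have h2 : (PySem.List.pyRange (a + 1) b 1).filter (fun m => m % 2 == (a + 2) % 2)
          = PySem.List.pyRange (a + 2) b 2 :=
        pvFilter_parity (a + 1) b (a + 2) (by omega) (by omega)
      have hpe : (fun m : Int => (m % 2 == a % 2 : Bool)) = (fun m : Int => (m % 2 == (a + 2) % 2 : Bool)) := by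
        funext m
        rw [Bool.eq_iff_iff]
        simp only [beq_iff_eq]
        omega
      rw [pvRange2_cons a b hab, hpe, h2]
      simp
    · have har : r = a + 1 := by omega
      have : ((a % 2 == r % 2) : Bool) = false := by
        simp only [beq_eq_false_iff_ne, ne_eq]
        omega
      rw [this]
      exact pvFilter_parity (a + 1) b r (by omega) (by omega)
  · rw [PySem.List.pyRange_one_eq_nil (by omega), pvRange2_nil r b (by omega)]
    simp
termination_by (b - a).toNat
decreasing_by all_goals omega

-- A's loop, for a fixed Bool test c on m, appends pvPairs o m exactly on the filtered indices
lemma pvLoopA (o : Int) (c : Int → Bool) (l : List Int) (acc : List (Int × Int)) :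
    l.foldl (fun out m =>
      let n := o - m
      if c m then
        let out := out ++ [(m, n)]
        if n > 0 then out ++ [(m, -n)] else out
      else out) acc = acc ++ (l.filter c).flatMap (pvPairs o) := by
  induction l generalizing acc with
  | nil => simp
  | cons x xs ih =>
    by_cases hx : c x
    · simp only [List.foldl_cons, List.filter_cons, hx, if_pos, ih]
      split_ifs with h
      · simp [pvPairs, show x < o by omega]
      · simp [pvPairs, show ¬ x < o by omega]
    · simp only [List.foldl_cons, List.filter_cons, hx, Bool.false_eq_true, if_false, ih]

-- B's loop appends pvPairs o m for every visited m
lemma pvLoopB (o : Int) (l : List Int) (acc : List (Int × Int)) :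
    l.foldl (fun out m =>
      let n := o - m
      let out := out ++ [(m, n)]
      if n > 0 then out ++ [(m, -n)] else out) acc = acc ++ l.flatMap (pvPairs o) := by
  induction l generalizing acc with
  | nil => simp
  | cons x xs ih =>
    simp only [List.foldl_cons, ih]
    split_ifs with h
    · simp [pvPairs, show x < o by omega]
    · simp [pvPairs, show ¬ x < o by omega]

lemma pvFmod2 (a : Int) : PySem.Int.mod a 2 = a % 2 := by
  simp [PySem.Int.mod, Int.fmod_eq_emod]

-- ===== VERDICT (by name: the statement is the Claim_ definition above) =====
theorem getmn_spec : Claim_equal_getmn := by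
  unfold Claim_equal_getmn
  intro o s _
  unfold Spec_getmn getmn getmn_alt getmnLoop
  by_cases hb : s = "b"
  · subst hb
    simp only [show (("b" : String) == "b") = true from rfl,
      show (("b" : String) == "a") = false from rfl, Bool.true_and, Bool.false_and,
      Bool.false_eq_true, if_false]
    rw [pvLoopA o (fun m => PySem.Int.mod (o - m) 2 == 0), pvLoopB]
    rw [List.filter_congr (q := fun m : Int => m % 2 == (o % 2) % 2)
      (fun m _ => by rw [Bool.eq_iff_iff]; simp only [beq_iff_eq, pvFmod2]; omega)]
    rw [pvFilter_parity 0 (o + 1) (o % 2) (Int.emod_nonneg o (by norm_num)) (by omega), pvFmod2]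
    simp
  · by_cases ha : s = "a"
    · subst ha
      simp only [show (("a" : String) == "b") = false from rfl,
        show (("a" : String) == "a") = true from rfl, Bool.true_and, Bool.false_and,
        Bool.false_eq_true, if_false]
      rw [pvLoopA o (fun m => PySem.Int.mod (o - m) 2 == 1), pvLoopB]
      rw [List.filter_congr (q := fun m : Int => m % 2 == (1 - o % 2) % 2)
        (fun m _ => by rw [Bool.eq_iff_iff]; simp only [beq_iff_eq, pvFmod2]; omega)]
      rw [pvFilter_parity 0 (o + 1) (1 - o % 2) (by omega) (by omega)]
      simp
    · have hb' : (s == "b") = false := by simp [hb]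
      have ha' : (s == "a") = false := by simp [ha]
      simp only [hb', ha', Bool.false_and, Bool.false_eq_true, if_false, List.foldl_fixed]
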